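-- pv_equiv track=rewrite | github.com/raogma/Python | 02-Fundamentals/02.Exercise/04.Functions/10. Array Manipulator.py | last_odd
-- ===== SOURCE A (Python) =====
-- def last_odd(num_list, count):
--     new_list = []
--     for i in range(len(num_list) - 1, -1, -1):
--         if num_list[i] % 2 != 0:
--             new_list.append(num_list[i])
--             count -= 1
--             if count == 0:
--                 return new_list[::-1]
--     return new_list[::-1]
-- ===== SOURCE B (Python) =====
-- def last_odd(num_list, count):
--     odds = [x for x in num_list if x % 2 != 0]
--     return odds[-count:] if count > 0 else odds
-- ===== Notes on version B (the rewrite author's own statement) =====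
-- stated objective: simpler
-- what changed: Replaces the backward index scan with an early-exit counter by one forward filter of the odd numbers followed by a tail slice (count > 0) or the whole list.
import Mathlib
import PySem

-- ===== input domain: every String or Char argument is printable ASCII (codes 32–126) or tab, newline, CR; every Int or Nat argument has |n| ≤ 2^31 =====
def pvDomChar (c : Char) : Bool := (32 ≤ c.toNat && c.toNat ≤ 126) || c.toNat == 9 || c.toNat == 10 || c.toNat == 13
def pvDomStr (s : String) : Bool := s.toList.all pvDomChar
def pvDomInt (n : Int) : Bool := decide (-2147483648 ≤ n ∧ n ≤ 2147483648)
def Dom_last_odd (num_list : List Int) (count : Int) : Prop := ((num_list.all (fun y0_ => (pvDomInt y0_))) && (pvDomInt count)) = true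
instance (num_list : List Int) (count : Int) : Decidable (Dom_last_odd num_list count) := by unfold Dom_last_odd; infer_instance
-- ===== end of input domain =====

-- B replaces A's backward index scan with early-exit counter by one forward
-- filter of the odds followed by a tail slice; same values, simpler structure.

-- ===== PORT A =====
-- the for-loop over range(len(num_list)-1, -1, -1), with new_list and count as
-- state; the early 'return new_list[::-1]' is the inner branch. num_list[i] is
-- ported as pyGetD with default 0, exact here since every produced index is in range.
def lastOddGoA (nl : List Int) (newl : List Int) (count : Int) : List Int → List Int
  | [] => (PySem.List.slice? newl none none (-1)).getD []
  | i :: rest =>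
    let x := PySem.List.pyGetD nl i 0
    if PySem.Int.mod x 2 ≠ 0 then
      if count - 1 = 0 then (PySem.List.slice? (newl ++ [x]) none none (-1)).getD []
      else lastOddGoA nl (newl ++ [x]) (count - 1) rest
    else lastOddGoA nl newl count rest

def last_odd (num_list : List Int) (count : Int) : List Int :=
  lastOddGoA num_list [] count
    (PySem.List.pyRange ((num_list.length : Int) - 1) (-1) (-1))

-- ===== PORT B =====
def last_odd_alt (num_list : List Int) (count : Int) : List Int :=
  let odds := num_list.filter (fun x => PySem.Int.mod x 2 ≠ 0)
  if count > 0 then PySem.List.slice odds (some (-count)) none else odds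

-- ===== PRECONDITION & SPEC =====
def Spec_last_odd (num_list : List Int) (count : Int) (out : List Int) : Prop := out = last_odd_alt num_list count
instance (num_list : List Int) (count : Int) (out : List Int) : Decidable (Spec_last_odd num_list count out) := by unfold Spec_last_odd; infer_instance

-- ===== CLAIM (what is proved, stated in full; the proofs are below) =====
def Claim_equal_last_odd : Prop := ∀ (num_list : List Int) (count : Int), Dom_last_odd num_list count → Spec_last_odd num_list count (last_odd num_list count)

-- ===== LEMMAS AND PROOFS =====

-- the sequence of odds A collects from a traversed value list, with A's early stop
def pvTakeOdds : List Int → Int → List Int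
  | [], _ => []
  | x :: xs, c =>
    if PySem.Int.mod x 2 ≠ 0 then
      (if c - 1 = 0 then [x] else x :: pvTakeOdds xs (c - 1))
    else pvTakeOdds xs c

theorem lastOddGoA_eq (nl : List Int) (idxs : List Int) (newl : List Int) (c : Int) :
    lastOddGoA nl newl c idxs
      = (newl ++ pvTakeOdds (idxs.map (fun i => PySem.List.pyGetD nl i 0)) c).reverse := by
  induction idxs generalizing newl c with
  | nil => simp [lastOddGoA, pvTakeOdds, PySem.List.slice?_none_none_neg_one]
  | cons i rest ih =>
    simp only [lastOddGoA, List.map_cons, pvTakeOdds]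
    split_ifs with h1 h2
    · simp [PySem.List.slice?_none_none_neg_one]
    · rw [ih]; simp
    · rw [ih]

theorem pvTakeOdds_eq (l : List Int) (c : Int) :
    pvTakeOdds l c
      = (if 0 < c then (l.filter (fun x => PySem.Int.mod x 2 ≠ 0)).take c.toNat
         else l.filter (fun x => PySem.Int.mod x 2 ≠ 0)) := by
  induction l generalizing c with
  | nil => simp [pvTakeOdds]
  | cons x xs ih =>
    simp only [pvTakeOdds]
    by_cases hx : PySem.Int.mod x 2 ≠ 0
    · rw [if_pos hx, List.filter_cons_of_pos (by simpa using hx)]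
      by_cases hc1 : c - 1 = 0
      · rw [if_pos hc1]
        have hc : c = 1 := by omega
        subst hc
        norm_num
      · rw [if_neg hc1, ih (c - 1)]
        by_cases hc : 0 < c
        · rw [if_pos (show 0 < c - 1 by omega), if_pos hc,
              show c.toNat = (c - 1).toNat + 1 from by omega, List.take_succ_cons]
        · rw [if_neg (show ¬ 0 < c - 1 by omega), if_neg hc]
    · rw [if_neg hx, List.filter_cons_of_neg (by simpa using hx), ih]

theorem map_pyGetD_countdown (nl : List Int) :
    (PySem.List.pyRange ((nl.length : Int) - 1) (-1) (-1)).map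
        (fun i => PySem.List.pyGetD nl i 0)
      = nl.reverse := by
  rw [PySem.List.pyRange_neg_one_eq_reverse, List.map_reverse]
  have h : ((-1 : Int) + 1) = 0 := by norm_num
  have h2 : ((nl.length : Int) - 1 + 1) = (nl.length : Int) := by ring
  rw [h, h2, PySem.List.map_pyGetD_pyRange_zero']

theorem last_odd_spec : Claim_equal_last_odd := by
  intro nl c _
  unfold Spec_last_odd last_odd last_odd_alt
  rw [lastOddGoA_eq, map_pyGetD_countdown, List.nil_append, pvTakeOdds_eq,
      List.filter_reverse]
  by_cases hc : 0 < c
  · rw [if_pos hc, if_pos hc]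
    set odds := nl.filter (fun x => decide (PySem.Int.mod x 2 ≠ 0)) with hodds
    have hneg : (-c) = -((c.toNat : Nat) : Int) := by omega
    rw [hneg, PySem.List.slice_from_neg_natCast _ _ (by omega)]
    rw [List.reverse_take, List.reverse_reverse, List.length_reverse]
  · rw [if_neg hc, if_neg hc, List.reverse_reverse]
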